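-- pv_equiv track=rewrite | github.com/hm-factor/leets | leets/bloom/edit_anagrams.py | edit_anagrams
-- ===== SOURCE A (Python) =====
-- def edit_anagrams(a: str, b: str) -> int:
--     # comments are for the 'edit' function which was an additional level of complexity
--     # (if a character would be deleted and added, condense into one operation)
--     letters = {}
--     count = 0
--     # pos = 0
--     # neg = 0
--
--     for ch in a:
--         if ch in letters:
--             letters[ch] += 1
--         else:
--             letters[ch] = 1
--     for ch in b:
--         if ch in letters:
--             letters[ch] -= 1
--         else:
--             letters[ch] = -1
--
--     for ch in letters.keys():
--         count += abs(letters[ch])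
--         # if letters[ch] > 0:
--         #   pos += 1
--         # elif letters[ch] < 0:
--         #   neg += 1
--
--     return count
-- ===== SOURCE B (Python) =====
-- def edit_anagrams(a: str, b: str) -> int:
--     matched = sum(min(a.count(ch), b.count(ch)) for ch in set(a))
--     return len(a) + len(b) - 2 * matched
-- ===== Notes on version B (the rewrite author's own statement) =====
-- stated objective: simpler
-- what changed: Replaces the three dict-accumulation loops (signed counts then a sum of absolute values) with a closed-form combination: matched = sum of per-character minimum counts over set(a), returning len(a)+len(b)-2*matched via the identity sum|na-nb| = len(a)+len(b)-2*sum(min(na,nb)).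
import Mathlib
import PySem

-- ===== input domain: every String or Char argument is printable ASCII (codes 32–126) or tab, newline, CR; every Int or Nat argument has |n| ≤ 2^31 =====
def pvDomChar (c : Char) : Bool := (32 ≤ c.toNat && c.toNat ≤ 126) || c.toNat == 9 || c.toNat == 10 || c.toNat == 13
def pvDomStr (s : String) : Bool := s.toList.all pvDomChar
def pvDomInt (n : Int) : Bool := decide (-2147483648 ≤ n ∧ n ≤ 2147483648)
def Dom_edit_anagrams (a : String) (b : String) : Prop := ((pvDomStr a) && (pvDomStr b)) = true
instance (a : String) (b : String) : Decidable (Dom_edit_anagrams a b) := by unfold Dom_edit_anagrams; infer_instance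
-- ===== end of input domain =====

-- B replaces A's three dict-accumulation loops by the closed form
-- len(a)+len(b)-2*sum(min counts) — objective: simpler.

-- ===== PORT A =====
def edit_anagrams (a : String) (b : String) : Int :=
  let letters1 : PySem.Dict Char Int := a.toList.foldl
    (fun d ch => if d.contains ch then d.insert ch (d.getD ch 0 + 1) else d.insert ch 1)
    PySem.Dict.empty
  let letters : PySem.Dict Char Int := b.toList.foldl
    (fun d ch => if d.contains ch then d.insert ch (d.getD ch 0 - 1) else d.insert ch (-1))
    letters1
  letters.keys.foldl (fun count ch => count + |letters.getD ch 0|) 0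

-- ===== PORT B =====
-- a.count(ch) for a single character ch is List.count on the characters (exact).
def edit_anagrams_alt (a : String) (b : String) : Int :=
  let matched : Int := ((PySem.Set.ofList a.toList).map
      (fun ch => min ((a.toList.count ch : Int)) ((b.toList.count ch : Int)))).sum
  (a.toList.length : Int) + (b.toList.length : Int) - 2 * matched

-- ===== PRECONDITION & SPEC =====
def Spec_edit_anagrams (a : String) (b : String) (out : Int) : Prop := out = edit_anagrams_alt a b
instance (a : String) (b : String) (out : Int) : Decidable (Spec_edit_anagrams a b out) := by unfold Spec_edit_anagrams; infer_instance

-- ===== CLAIM (what is proved, stated in full; the proofs are below) =====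
def Claim_equal_edit_anagrams : Prop := ∀ (a : String) (b : String), Dom_edit_anagrams a b → Spec_edit_anagrams a b (edit_anagrams a b)

-- ===== LEMMAS AND PROOFS =====

-- both branches of A's first-loop body are d.insert ch (d.getD ch 0 + 1)
lemma step_add_eq (d : PySem.Dict Char Int) (ch : Char) :
    (if d.contains ch then d.insert ch (d.getD ch 0 + 1) else d.insert ch 1)
      = d.insert ch (d.getD ch 0 + 1) := by
  by_cases h : d.contains ch = true
  · simp [h]
  · simp only [Bool.not_eq_true] at h
    simp [h, PySem.Dict.getD_of_not_contains d (0:Int) h]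

lemma step_sub_eq (d : PySem.Dict Char Int) (ch : Char) :
    (if d.contains ch then d.insert ch (d.getD ch 0 - 1) else d.insert ch (-1))
      = d.insert ch (d.getD ch 0 - 1) := by
  by_cases h : d.contains ch = true
  · simp [h]
  · simp only [Bool.not_eq_true] at h
    simp [h, PySem.Dict.getD_of_not_contains d (0:Int) h]

lemma getD_foldl_insert_sub_one (l : List Char) (d : PySem.Dict Char Int) (v : Char) :
    (l.foldl (fun d x => d.insert x (d.getD x 0 - 1)) d).getD v 0
      = d.getD v 0 - l.count v := by
  induction l generalizing d with
  | nil => simp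
  | cons x xs ih =>
    simp only [List.foldl_cons, ih, PySem.Dict.getD_insert, List.count_cons]
    by_cases h : v = x
    · subst h; simp; omega
    · simp [h, Ne.symm h]

lemma update_ofList_eq (as bs : List Char) :
    PySem.Set.update (PySem.Set.ofList as) bs = PySem.Set.ofList (as ++ bs) := by
  simp [PySem.Set.ofList_eq_foldl, PySem.Set.update, List.foldl_append]

-- for a Nodup list L containing every character of xs, the counts over L sum to |xs|
lemma sum_count_over (L : List Char) (hn : L.Nodup) (xs : List Char)
    (h : ∀ x ∈ xs, x ∈ L) :
    (L.map (fun k => (xs.count k : Int))).sum = xs.length := by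
  have hF : L.toFinset.sum (fun k => (xs.count k : Int)) = (L.map _).sum :=
    List.sum_toFinset _ hn
  rw [← hF]
  have hsub : xs.toFinset ⊆ L.toFinset := by
    intro k hk; rw [List.mem_toFinset] at *; exact h _ hk
  rw [← Finset.sum_subset hsub (by
    intro k _ hk
    rw [List.mem_toFinset] at hk
    simp [List.count_eq_zero.mpr hk])]
  rw [← Nat.cast_sum]
  norm_cast
  simpa using Multiset.toFinset_sum_count_eq (↑xs : Multiset Char)

lemma sum_min_over (L : List Char) (hn : L.Nodup) (xs ys : List Char)
    (h : ∀ x ∈ xs, x ∈ L) :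
    (L.map (fun k => min (xs.count k : Int) (ys.count k : Int))).sum
      = ((PySem.Set.ofList xs).map (fun k => min (xs.count k : Int) (ys.count k : Int))).sum := by
  rw [← List.sum_toFinset _ hn, ← List.sum_toFinset _ (PySem.Set.nodup_ofList xs)]
  have hts : (PySem.Set.ofList xs).toFinset = xs.toFinset := by
    ext k; simp [List.mem_toFinset, PySem.Set.mem_ofList]
  rw [hts]
  have hsub : xs.toFinset ⊆ L.toFinset := by
    intro k hk; rw [List.mem_toFinset] at *; exact h _ hk
  refine (Finset.sum_subset hsub ?_).symm
  intro k _ hk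
  rw [List.mem_toFinset] at hk
  simp [List.count_eq_zero.mpr hk]

lemma final_sum (xs ys : List Char) :
    ((PySem.Set.ofList (xs ++ ys)).map
        (fun ch => |(xs.count ch : Int) - (ys.count ch : Int)|)).sum
      = (xs.length : Int) + (ys.length : Int)
        - 2 * ((PySem.Set.ofList xs).map
            (fun ch => min (xs.count ch : Int) (ys.count ch : Int))).sum := by
  have hnL : (PySem.Set.ofList (xs ++ ys)).Nodup := PySem.Set.nodup_ofList _
  have hmemx : ∀ x ∈ xs, x ∈ PySem.Set.ofList (xs ++ ys) := by
    intro x hx; rw [PySem.Set.mem_ofList]; exact List.mem_append_left _ hx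
  have hmemy : ∀ x ∈ ys, x ∈ PySem.Set.ofList (xs ++ ys) := by
    intro x hx; rw [PySem.Set.mem_ofList]; exact List.mem_append_right _ hx
  have hpt : ∀ (L : List Char),
      (L.map (fun k => |(xs.count k : Int) - (ys.count k : Int)|)).sum
        = (L.map (fun k => (xs.count k : Int))).sum
          + (L.map (fun k => (ys.count k : Int))).sum
          - 2 * (L.map (fun k => min (xs.count k : Int) (ys.count k : Int))).sum := by
    intro L
    induction L with
    | nil => simp
    | cons c cs ih =>
      simp only [List.map_cons, List.sum_cons]
      have habs : |(xs.count c : Int) - (ys.count c : Int)|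
          = (xs.count c : Int) + (ys.count c : Int)
            - 2 * min (xs.count c : Int) (ys.count c : Int) := by
        rcases abs_cases ((xs.count c : Int) - (ys.count c : Int)) with ⟨h1, h2⟩ | ⟨h1, h2⟩ <;> omega
      rw [habs, ih]
      ring
  rw [hpt, sum_count_over _ hnL xs hmemx, sum_count_over _ hnL ys hmemy,
      sum_min_over _ hnL xs ys hmemx]

-- ===== VERDICT (by name: the statement is the Claim_ definition above) =====
theorem edit_anagrams_spec : Claim_equal_edit_anagrams := by
  intro a b _
  unfold Spec_edit_anagrams edit_anagrams edit_anagrams_alt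
  simp only [step_add_eq, step_sub_eq]
  rw [PySem.List.foldl_add]
  simp only [getD_foldl_insert_sub_one, PySem.Dict.getD_foldl_insert_add_one,
    PySem.Dict.getD_empty, PySem.Dict.keys_foldl_insert, PySem.Dict.keys_empty,
    PySem.Set.update_nil_left, update_ofList_eq, zero_add]
  exact final_sum a.toList b.toList
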